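-- pv_equiv track=rewrite | github.com/Thinklab-SJTU/UP2ME | utils/tools.py | segment_adjust_flip
-- ===== SOURCE A (Python) =====
-- def segment_adjust_flip(gt, old_pred, flip_idx):
--     '''
--     flip one prediction from 0 to 1 then re-adjust the segment
--     used for compute the roc curve
--     '''
--
--     new_pred = old_pred
--     delta_true_positive = 0
--     delta_false_positive = 0
--     if new_pred[flip_idx] == 1: #has already been adjusted by previous flip
--         return gt, new_pred, delta_true_positive, delta_false_positive
--     else:
--         new_pred[flip_idx] = 1
--         if (gt[flip_idx] == 1): delta_true_positive += 1
--         else: delta_false_positive += 1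
--
--     if gt[flip_idx] == 1 and new_pred[flip_idx] == 1:
--         #detect an anomaly point, adjust the whole segment
--         for j in range(flip_idx + 1, len(gt)): #adjust the right side
--             if gt[j] == 0:
--                 break
--             else:
--                 new_pred[j] = 1
--                 delta_true_positive += 1
--
--         for j in range(flip_idx - 1, -1, -1): #adjust the left side
--             if gt[j] == 0:
--                 break
--             else:
--                 new_pred[j] = 1
--                 delta_true_positive += 1
--
--     return gt, new_pred, delta_true_positive, delta_false_positive
-- ===== SOURCE B (Python) =====
-- def segment_adjust_flip(gt, old_pred, flip_idx):
--     '''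
--     flip one prediction from 0 to 1 then re-adjust the segment
--     used for compute the roc curve
--     (mutates old_pred in place, like the original)
--     '''
--     new_pred = old_pred
--     if new_pred[flip_idx] == 1:  # already adjusted by a previous flip
--         return gt, new_pred, 0, 0
--     if gt[flip_idx] != 1:  # false positive: just the single point
--         new_pred[flip_idx] = 1
--         return gt, new_pred, 0, 1
--     # true positive: label every position with the start of its maximal
--     # run of non-zero gt values, in one left-to-right pass
--     n = len(gt)
--     start = [0] * n
--     for j in range(n):
--         start[j] = start[j - 1] if j > 0 and gt[j - 1] != 0 and gt[j] != 0 else j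
--     i0 = flip_idx if flip_idx >= 0 else flip_idx + n
--     s = start[i0]
--     # the anomaly segment is exactly the block sharing the flipped point's label
--     tp = 0
--     for j in range(s, n):
--         if start[j] != s:
--             break
--         new_pred[j] = 1
--         tp += 1
--     return gt, new_pred, tp, 0
-- ===== Notes on version B (the rewrite author's own statement) =====
-- stated objective: alternative
-- what changed: B replaces A's bidirectional expand-and-write loops around flip_idx by a single left-to-right labelling pass that records, for every position, the start of its maximal nonzero-gt run, then writes the block sharing the flipped point's label in one forward scan and returns the block length.
-- intended difference: On negative flip_idx entering the segment branch whose anomaly segment either extends left of the wrapped position (without also wrapping past the end) or runs nonzero to the array end and over gt[0] (without a left extension), A's raw range bounds make it skip the left extension or re-count from index 0, so it returns a too-small or inflated delta_true_positive with matching missing/stray writes; B adjusts exactly the contiguous segment around the wrapped position, the intended value. — e.g. on segment_adjust_flip([1, 1, 0], [0, 0, 0], -2): A returns ([1, 1, 0], [0, 1, 0], 1, 0), B returns ([1, 1, 0], [1, 1, 0], 2, 0)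
-- outside the precondition, e.g. on segment_adjust_flip([1], [0, 0], -1): A returns ([1], [1, 1], 2, 0), B returns ([1], [1, 0], 1, 0); on segment_adjust_flip([1, 1], [0, 0], -1): A returns ([1, 1], [1, 1], 3, 0), B returns ([1, 1], [1, 1], 2, 0)
import Mathlib
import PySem

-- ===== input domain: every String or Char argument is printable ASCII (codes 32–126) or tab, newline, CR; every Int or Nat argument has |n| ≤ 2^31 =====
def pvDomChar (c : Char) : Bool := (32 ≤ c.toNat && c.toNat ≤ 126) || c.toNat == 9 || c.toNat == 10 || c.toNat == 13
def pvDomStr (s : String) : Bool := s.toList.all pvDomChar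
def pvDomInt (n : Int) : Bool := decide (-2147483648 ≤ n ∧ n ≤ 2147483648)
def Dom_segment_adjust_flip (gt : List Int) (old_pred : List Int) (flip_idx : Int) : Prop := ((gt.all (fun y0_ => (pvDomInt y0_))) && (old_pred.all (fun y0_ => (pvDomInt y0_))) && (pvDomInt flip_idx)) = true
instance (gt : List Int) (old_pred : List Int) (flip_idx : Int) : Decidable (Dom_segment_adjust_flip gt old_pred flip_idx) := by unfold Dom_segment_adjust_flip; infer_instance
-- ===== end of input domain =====

-- B replaces A's bidirectional expand-and-write loops by a one-pass run-start labelling of gt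
-- followed by one forward writing scan over the labelled block (objective: alternative). Both
-- Pythons mutate old_pred in place (the same cells on the proved region); the equivalence proved
-- here is about the returned 4-tuple. On negative flip_idx reaching the segment branch A's value
-- is wrong on the D_ region below and B returns the intended one.

-- ===== PORT A =====
-- the body of A's two adjustment loops (break on gt[j] == 0, else write and count),
-- run over the index list of the corresponding range; state = (new_pred, delta_true_positive).
-- pyGetD/pySetD are the total forms of gt[j] / new_pred[j] = 1; exact under Pre_ (indices in range).
def segLoop (gt : List Int) : List Int → List Int × Int → List Int × Int
  | [], s => s
  | j :: js, s =>
    if PySem.List.pyGetD gt j 0 = 0 then s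
    else segLoop gt js (PySem.List.pySetD s.1 j 1, s.2 + 1)

def segment_adjust_flip (gt : List Int) (old_pred : List Int) (flip_idx : Int) : List Int × List Int × Int × Int :=
  let new_pred := old_pred
  if PySem.List.pyGetD new_pred flip_idx 0 = 1 then
    (gt, new_pred, 0, 0)
  else
    let np0 := PySem.List.pySetD new_pred flip_idx 1
    let tp0 : Int := if PySem.List.pyGetD gt flip_idx 0 = 1 then 0 + 1 else 0
    let fp0 : Int := if PySem.List.pyGetD gt flip_idx 0 = 1 then 0 else 0 + 1
    if PySem.List.pyGetD gt flip_idx 0 = 1 ∧ PySem.List.pyGetD np0 flip_idx 0 = 1 then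
      let r1 := segLoop gt (PySem.List.pyRange (flip_idx + 1) (PySem.List.len gt) 1) (np0, tp0)
      let r2 := segLoop gt (PySem.List.pyRange (flip_idx - 1) (-1) (-1)) r1
      (gt, r2.1, r2.2, fp0)
    else
      (gt, np0, tp0, fp0)

-- ===== PORT B =====
-- start[j] = start[j-1] if j > 0 and gt[j-1] != 0 and gt[j] != 0 else j, for j in range(n)
def buildStart (gt : List Int) : List Int :=
  (PySem.List.pyRange 0 (PySem.List.len gt) 1).foldl
    (fun st j =>
      PySem.List.pySetD st j
        (if 0 < j ∧ PySem.List.pyGetD gt (j - 1) 0 ≠ 0 ∧ PySem.List.pyGetD gt j 0 ≠ 0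
         then PySem.List.pyGetD st (j - 1) 0 else j))
    (List.replicate gt.length 0)

-- for j in range(s, n): if start[j] != s: break; new_pred[j] = 1; tp += 1
def scanSeg (start : List Int) (s : Int) : List Int → List Int × Int → List Int × Int
  | [], acc => acc
  | j :: js, acc =>
    if PySem.List.pyGetD start j 0 ≠ s then acc
    else scanSeg start s js (PySem.List.pySetD acc.1 j 1, acc.2 + 1)

def segment_adjust_flip_alt (gt : List Int) (old_pred : List Int) (flip_idx : Int) : List Int × List Int × Int × Int :=
  if PySem.List.pyGetD old_pred flip_idx 0 = 1 then
    (gt, old_pred, 0, 0)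
  else if PySem.List.pyGetD gt flip_idx 0 ≠ 1 then
    (gt, PySem.List.pySetD old_pred flip_idx 1, 0, 1)
  else
    let n : Int := PySem.List.len gt
    let start := buildStart gt
    let i0 : Int := if 0 ≤ flip_idx then flip_idx else flip_idx + n
    let s := PySem.List.pyGetD start i0 0
    let r := scanSeg start s (PySem.List.pyRange s n 1) (old_pred, 0)
    (gt, r.1, r.2, 0)

-- ===== PRECONDITION & SPEC =====
-- negative flip_idx entering A's anomaly-segment branch
def pvNegSeg (gt : List Int) (old_pred : List Int) (flip_idx : Int) : Prop :=
  flip_idx < 0 ∧ PySem.Raise.InRange gt.length flip_idx ∧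
    PySem.Raise.InRange old_pred.length flip_idx ∧
    PySem.List.pyGetD old_pred flip_idx 0 ≠ 1 ∧ PySem.List.pyGetD gt flip_idx 0 = 1

-- the anomaly segment extends left of the wrapped position flip_idx + len(gt)
def pvLeftExt (gt : List Int) (flip_idx : Int) : Prop :=
  0 < flip_idx + (gt.length : Int) ∧
    PySem.List.pyGetD gt (flip_idx + (gt.length : Int) - 1) 0 ≠ 0

-- gt is nonzero from right of the wrapped position to the end AND at index 0,
-- so A's raw-bounded right loop runs past the end and restarts writing at index 0
def pvWrapFull (gt : List Int) (flip_idx : Int) : Prop :=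
  (∀ z ∈ PySem.List.pyRange (flip_idx + (gt.length : Int) + 1) (gt.length : Int) 1,
      PySem.List.pyGetD gt z 0 ≠ 0) ∧ PySem.List.pyGetD gt 0 0 ≠ 0

-- Pre_ requires flip_idx to be a valid, possibly negative, Python index into old_pred (otherwise
-- A raises IndexError at new_pred[flip_idx]) and, unless A stops before its adjustment loops
-- (old_pred[flip_idx] == 1, or flip_idx valid in gt with gt[flip_idx] != 1), that gt and old_pred
-- are parallel arrays of equal length: with mismatched lengths the segment loops may raise
-- IndexError. Pre_ also excludes the doubly-degenerate negative-flip corner where the segment both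
-- extends left of the wrapped position and runs nonzero to the array end with gt[0] != 0: there
-- A's raw-bounded scan skips the left extension AND wraps around re-counting from index 0 at once.
def Pre_segment_adjust_flip (gt : List Int) (old_pred : List Int) (flip_idx : Int) : Prop :=
  PySem.Raise.InRange old_pred.length flip_idx ∧
    (gt.length = old_pred.length
      ∨ PySem.List.pyGetD old_pred flip_idx 0 = 1
      ∨ (PySem.Raise.InRange gt.length flip_idx ∧ PySem.List.pyGetD gt flip_idx 0 ≠ 1)) ∧
    ¬(pvNegSeg gt old_pred flip_idx ∧ pvLeftExt gt flip_idx ∧ pvWrapFull gt flip_idx)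
instance (gt : List Int) (old_pred : List Int) (flip_idx : Int) : Decidable (Pre_segment_adjust_flip gt old_pred flip_idx) := by unfold Pre_segment_adjust_flip pvNegSeg pvLeftExt pvWrapFull; infer_instance

def pvWitness_segment_adjust_flip : List Int × List Int × Int := ([1, 1, 0], [0, 0, 0], 0)

-- On negative flip_idx entering the anomaly-segment branch whose segment extends left of the
-- wrapped position (but does not also wrap past the end), or wraps past the end onto a nonzero
-- gt[0] (but has no left extension), A's raw range bounds make it skip the left extension or
-- re-count from index 0, returning a too-small or inflated delta_true_positive with the matching
-- stray/missing writes; B adjusts exactly the contiguous anomaly segment around the wrapped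
-- position, the intended value.
-- (written with Python's own wraparound reads: gt[flip_idx-1] != 0 says the segment extends left
-- of the wrapped position, "gt[z] != 0 for z in range(flip_idx+1, 1)" says it runs nonzero to the
-- array end and over gt[0]; exactly one of the two must hold)
def D_segment_adjust_flip (gt : List Int) (old_pred : List Int) (flip_idx : Int) : Prop :=
  flip_idx < 0 ∧ PySem.List.pyGetD old_pred flip_idx 0 ≠ 1 ∧
    PySem.List.pyGetD gt flip_idx 0 = 1 ∧
    ¬((PySem.List.pyGetD gt (flip_idx - 1) 0 ≠ 0) ↔
        ∀ z ∈ PySem.List.pyRange (flip_idx + 1) 1 1, PySem.List.pyGetD gt z 0 ≠ 0)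
instance (gt : List Int) (old_pred : List Int) (flip_idx : Int) : Decidable (D_segment_adjust_flip gt old_pred flip_idx) := by unfold D_segment_adjust_flip; infer_instance

def Spec_segment_adjust_flip (gt : List Int) (old_pred : List Int) (flip_idx : Int) (out : List Int × List Int × Int × Int) : Prop := ¬ D_segment_adjust_flip gt old_pred flip_idx → out = segment_adjust_flip_alt gt old_pred flip_idx
instance (gt : List Int) (old_pred : List Int) (flip_idx : Int) (out : List Int × List Int × Int × Int) : Decidable (Spec_segment_adjust_flip gt old_pred flip_idx out) := by unfold Spec_segment_adjust_flip; infer_instance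

def pvDiffWitness_segment_adjust_flip : List Int × List Int × Int := ([1, 1, 0], [0, 0, 0], -2)
def pvDiffWitnessOut_segment_adjust_flip : (List Int × List Int × Int × Int) × (List Int × List Int × Int × Int) :=
  (([1, 1, 0], [0, 1, 0], 1, 0), ([1, 1, 0], [1, 1, 0], 2, 0))

-- ===== CLAIM (what is proved, stated in full; the proofs are below) =====
def Claim_unchanged_segment_adjust_flip : Prop := ∀ (gt : List Int) (old_pred : List Int) (flip_idx : Int), Dom_segment_adjust_flip gt old_pred flip_idx → Pre_segment_adjust_flip gt old_pred flip_idx → Spec_segment_adjust_flip gt old_pred flip_idx (segment_adjust_flip gt old_pred flip_idx)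
def Claim_changed_segment_adjust_flip : Prop := Dom_segment_adjust_flip (pvDiffWitness_segment_adjust_flip.1) (pvDiffWitness_segment_adjust_flip.2.1) (pvDiffWitness_segment_adjust_flip.2.2) ∧ Pre_segment_adjust_flip (pvDiffWitness_segment_adjust_flip.1) (pvDiffWitness_segment_adjust_flip.2.1) (pvDiffWitness_segment_adjust_flip.2.2) ∧ D_segment_adjust_flip (pvDiffWitness_segment_adjust_flip.1) (pvDiffWitness_segment_adjust_flip.2.1) (pvDiffWitness_segment_adjust_flip.2.2) ∧ segment_adjust_flip (pvDiffWitness_segment_adjust_flip.1) (pvDiffWitness_segment_adjust_flip.2.1) (pvDiffWitness_segment_adjust_flip.2.2) = pvDiffWitnessOut_segment_adjust_flip.1 ∧ segment_adjust_flip_alt (pvDiffWitness_segment_adjust_flip.1) (pvDiffWitness_segment_adjust_flip.2.1) (pvDiffWitness_segment_adjust_flip.2.2) = pvDiffWitnessOut_segment_adjust_flip.2 ∧ pvDiffWitnessOut_segment_adjust_flip.1 ≠ pvDiffWitnessOut_segment_adjust_flip.2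
def Claim_exact_segment_adjust_flip : Prop := ∀ (gt : List Int) (old_pred : List Int) (flip_idx : Int), Dom_segment_adjust_flip gt old_pred flip_idx → Pre_segment_adjust_flip gt old_pred flip_idx → D_segment_adjust_flip gt old_pred flip_idx → segment_adjust_flip gt old_pred flip_idx ≠ segment_adjust_flip_alt gt old_pred flip_idx

-- ===== LEMMAS AND PROOFS =====

-- proof-only bound scans: bHi/bLo compute the right/left end of the maximal
-- nonzero run of gt; both ports' loops are characterised through them.
def bHi (gt : List Int) (hi : Int) : Int :=
  if h : hi + 1 < PySem.List.len gt ∧ PySem.List.pyGetD gt (hi + 1) 0 ≠ 0 then bHi gt (hi + 1)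
  else hi
termination_by (PySem.List.len gt - hi).toNat
decreasing_by simp only [PySem.List.len_eq] at *; omega

def bLo (gt : List Int) (lo : Int) : Int :=
  if h : 0 < lo ∧ PySem.List.pyGetD gt (lo - 1) 0 ≠ 0 then bLo gt (lo - 1)
  else lo
termination_by lo.toNat
decreasing_by omega

-- normalisation of a valid Python index: pyIdx? returns some k with k < n
theorem pyIdx?_of_inRange (n : Nat) (i : Int) (h1 : -(n : Int) ≤ i) (h2 : i < (n : Int)) :
    ∃ k : Nat, PySem.List.pyIdx? n i = some k ∧ k < n := by
  unfold PySem.List.pyIdx?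
  by_cases h0 : 0 ≤ i
  · exact ⟨i.toNat, by simp [h0, h2], by omega⟩
  · exact ⟨n - (-i).toNat, by simp [h0, h1], by omega⟩

-- writing 1 at the flipped index makes the re-read new_pred[flip_idx] == 1
theorem pyGetD_pySetD_self (xs : List Int) (i v d : Int)
    (h1 : -(xs.length : Int) ≤ i) (h2 : i < (xs.length : Int)) :
    PySem.List.pyGetD (PySem.List.pySetD xs i v) i d = v := by
  obtain ⟨k, hk, hklt⟩ := pyIdx?_of_inRange xs.length i h1 h2
  simp [PySem.List.pyGetD, PySem.List.pySetD, PySem.List.pyGet?, PySem.List.pySet?, hk, hklt]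

-- all writes store the same value 1, so they commute (even at equal or wrapped indices)
theorem pySetD_comm (xs : List Int) (j k : Int) :
    PySem.List.pySetD (PySem.List.pySetD xs j 1) k 1
      = PySem.List.pySetD (PySem.List.pySetD xs k 1) j 1 := by
  simp only [PySem.List.pySetD, PySem.List.pySet?]
  cases hj : PySem.List.pyIdx? xs.length j with
  | none =>
    cases hk : PySem.List.pyIdx? xs.length k with
    | none => simp [hj, hk]
    | some b => simp [hj, List.length_set, hk]
  | some a =>
    cases hk : PySem.List.pyIdx? xs.length k with
    | none => simp [hj, List.length_set, hk]
    | some b =>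
      simp only [Option.map_some, Option.getD_some, List.length_set, hj, hk]
      by_cases hab : a = b
      · subst hab; simp [List.set_set]
      · simp [List.set_comm _ _ hab]

theorem bHi_ge (gt : List Int) (hi : Int) : hi ≤ bHi gt hi := by
  induction hi using bHi.induct gt with
  | case1 x h ih => rw [bHi, dif_pos h]; omega
  | case2 x h => rw [bHi, dif_neg h]

theorem bLo_le (gt : List Int) (lo : Int) : bLo gt lo ≤ lo := by
  induction lo using bLo.induct gt with
  | case1 x h ih => rw [bLo, dif_pos h]; omega
  | case2 x h => rw [bLo, dif_neg h]

theorem bLo_nonneg (gt : List Int) (lo : Int) (h : 0 ≤ lo) : 0 ≤ bLo gt lo := by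
  induction lo using bLo.induct gt with
  | case1 x hx ih => rw [bLo, dif_pos hx]; exact ih (by omega)
  | case2 x hx => rw [bLo, dif_neg hx]; exact h

theorem bHi_lt (gt : List Int) (x : Int) (h : x < (gt.length : Int)) :
    bHi gt x < (gt.length : Int) := by
  induction x using bHi.induct gt with
  | case1 y hy ih =>
    rw [bHi, dif_pos hy]
    exact ih (by simpa [PySem.List.len_eq] using hy.1)
  | case2 y hy => rw [bHi, dif_neg hy]; exact h

theorem bHi_fix (gt : List Int) (x : Int) :
    ¬(bHi gt x + 1 < (gt.length : Int) ∧ PySem.List.pyGetD gt (bHi gt x + 1) 0 ≠ 0) := by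
  induction x using bHi.induct gt with
  | case1 y hy ih => rw [bHi, dif_pos hy]; exact ih
  | case2 y hy => rw [bHi, dif_neg hy]; simpa [PySem.List.len_eq] using hy

-- down the left run: every position between bLo gt lo and lo is nonzero and has the same bLo
theorem bLo_run (gt : List Int) (lo : Int) (hnz : PySem.List.pyGetD gt lo 0 ≠ 0) :
    ∀ m, bLo gt lo ≤ m → m ≤ lo → PySem.List.pyGetD gt m 0 ≠ 0 ∧ bLo gt m = bLo gt lo := by
  induction lo using bLo.induct gt with
  | case1 y hy ih =>
    intro m h1 h2
    have hby : bLo gt y = bLo gt (y - 1) := by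
      conv_lhs => rw [bLo]
      exact dif_pos hy
    rw [hby] at h1 ⊢
    by_cases hm : m = y
    · subst hm; exact ⟨hnz, hby⟩
    · exact ih hy.2 m h1 (by omega)
  | case2 y hy =>
    intro m h1 h2
    have hby : bLo gt y = y := by
      conv_lhs => rw [bLo]
      exact dif_neg hy
    rw [hby] at h1 ⊢
    have : m = y := by omega
    subst this; exact ⟨hnz, hby⟩
-- up the right run: every position between x and bHi gt x is nonzero and has the same bLo
theorem bHi_run (gt : List Int) (x : Int) (hx : 0 ≤ x) (hnz : PySem.List.pyGetD gt x 0 ≠ 0) :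
    ∀ m, x ≤ m → m ≤ bHi gt x → PySem.List.pyGetD gt m 0 ≠ 0 ∧ bLo gt m = bLo gt x := by
  induction x using bHi.induct gt with
  | case1 y hy ih =>
    intro m h1 h2
    rw [bHi, dif_pos hy] at h2
    by_cases hm : m = y
    · subst hm; exact ⟨hnz, rfl⟩
    · have step : bLo gt (y + 1) = bLo gt y := by
        rw [bLo, dif_pos (by constructor <;> [omega; simpa using hnz])]
        simp
      have := ih (by omega) hy.2 m (by omega) h2
      exact ⟨this.1, this.2.trans step⟩
  | case2 y hy =>
    intro m h1 h2
    rw [bHi, dif_neg hy] at h2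
    have : m = y := by omega
    subst this; exact ⟨hnz, rfl⟩

-- the run-start label of position m: itself on zeros, else the left end of its run
def runLabel (gt : List Int) (m : Int) : Int :=
  if PySem.List.pyGetD gt m 0 = 0 then m else bLo gt m

-- invariant of the labelling loop: after processing range(0, k) the first k cells carry
-- their run label and the rest still hold the initial 0
theorem buildStart_aux (gt : List Int) : ∀ (k : Nat), k ≤ gt.length →
    ((PySem.List.pyRange 0 (k : Int) 1).foldl
        (fun st j =>
          PySem.List.pySetD st j
            (if 0 < j ∧ PySem.List.pyGetD gt (j - 1) 0 ≠ 0 ∧ PySem.List.pyGetD gt j 0 ≠ 0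
             then PySem.List.pyGetD st (j - 1) 0 else j))
        (List.replicate gt.length 0)).length = gt.length ∧
      ∀ m : Int, 0 ≤ m → m < (gt.length : Int) →
        PySem.List.pyGetD
          ((PySem.List.pyRange 0 (k : Int) 1).foldl
            (fun st j =>
              PySem.List.pySetD st j
                (if 0 < j ∧ PySem.List.pyGetD gt (j - 1) 0 ≠ 0 ∧ PySem.List.pyGetD gt j 0 ≠ 0
                 then PySem.List.pyGetD st (j - 1) 0 else j))
            (List.replicate gt.length 0)) m 0
          = if m < (k : Int) then runLabel gt m else 0 := by
  intro k
  induction k with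
  | zero =>
    intro _
    simp only [Nat.cast_zero]
    constructor
    · simp [PySem.List.pyRange_one_eq_nil (by omega : (0:Int) ≤ 0)]
    · intro m hm0 hmn
      rw [PySem.List.pyRange_one_eq_nil (by omega : (0:Int) ≤ 0)]
      simp only [List.foldl_nil]
      rw [if_neg (by omega)]
      rw [PySem.List.pyGetD_eq_getElem _ _ hm0 (by simpa using hmn)]
      simp
  | succ k ih =>
    intro hk
    obtain ⟨ihlen, ihget⟩ := ih (by omega)
    have hsplit : PySem.List.pyRange 0 ((k + 1 : Nat) : Int) 1
        = PySem.List.pyRange 0 (k : Int) 1 ++ [(k : Int)] := by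
      push_cast
      exact PySem.List.pyRange_one_succ_right (by omega)
    rw [hsplit, List.foldl_append]
    set st := (PySem.List.pyRange 0 (k : Int) 1).foldl
        (fun st j =>
          PySem.List.pySetD st j
            (if 0 < j ∧ PySem.List.pyGetD gt (j - 1) 0 ≠ 0 ∧ PySem.List.pyGetD gt j 0 ≠ 0
             then PySem.List.pyGetD st (j - 1) 0 else j)) (List.replicate gt.length 0) with hst
    simp only [List.foldl_cons, List.foldl_nil]
    have hklt : k < st.length := by omega
    constructor
    · rw [PySem.List.pySetD_natCast]
      simp [ihlen]
    · intro m hm0 hmn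
      -- the value written at cell k is its run label
      have hval : (if 0 < (k : Int) ∧ PySem.List.pyGetD gt ((k : Int) - 1) 0 ≠ 0
              ∧ PySem.List.pyGetD gt (k : Int) 0 ≠ 0
            then PySem.List.pyGetD st ((k : Int) - 1) 0 else (k : Int)) = runLabel gt (k : Int) := by
        by_cases hz : PySem.List.pyGetD gt (k : Int) 0 = 0
        · rw [if_neg (by tauto)]
          rw [runLabel, if_pos hz]
        · by_cases hk0 : 0 < (k : Int)
          · by_cases hp : PySem.List.pyGetD gt ((k : Int) - 1) 0 ≠ 0
            · rw [if_pos ⟨hk0, hp, hz⟩]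
              have hprev : PySem.List.pyGetD st ((k : Int) - 1) 0 = runLabel gt ((k : Int) - 1) := by
                rw [ihget ((k : Int) - 1) (by omega) (by omega)]
                rw [if_pos (by omega)]
              rw [hprev, runLabel, runLabel, if_neg hp, if_neg hz]
              have : bLo gt (k : Int) = bLo gt ((k : Int) - 1) := by
                conv_lhs => rw [bLo]
                exact dif_pos ⟨hk0, hp⟩
              omega
            · rw [if_neg (by tauto)]
              rw [runLabel, if_neg hz]
              have : bLo gt (k : Int) = (k : Int) := by
                conv_lhs => rw [bLo]
                exact dif_neg (by tauto)
              omega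
          · rw [if_neg (by tauto)]
            rw [runLabel, if_neg hz]
            have : bLo gt (k : Int) = (k : Int) := by
              conv_lhs => rw [bLo]
              exact dif_neg (by omega)
            omega
      rw [hval]
      rw [PySem.List.pySetD_natCast]
      rw [PySem.List.pyGetD_eq_getElem _ _ hm0 (by simp only [List.length_set]; omega)]
      rw [List.getElem_set]
      by_cases hmk : m = (k : Int)
      · rw [if_pos (by omega), hmk, if_pos (by omega)]
      · rw [if_neg (by omega)]
        have hb : st[m.toNat]'(by omega) = PySem.List.pyGetD st m 0 :=
          (PySem.List.pyGetD_eq_getElem _ _ hm0 (by omega)).symm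
        rw [hb, ihget m hm0 hmn]
        by_cases hlt : m < (k : Int)
        · rw [if_pos hlt, if_pos (by omega)]
        · rw [if_neg hlt, if_neg (by omega)]

-- the labelling pass: length and pointwise characterisation
theorem buildStart_spec (gt : List Int) :
    (buildStart gt).length = gt.length ∧
      ∀ m : Int, 0 ≤ m → m < (gt.length : Int) →
        PySem.List.pyGetD (buildStart gt) m 0 = runLabel gt m := by
  have h := buildStart_aux gt gt.length (le_refl _)
  rw [buildStart, show PySem.List.len gt = ((gt.length : Nat) : Int) from by simp]
  exact ⟨h.1, fun m hm0 hmn => by rw [h.2 m hm0 hmn, if_pos (by omega)]⟩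

-- B's writing scan characterised by bHi: from j in [s, hi+1], with labels equal to s
-- exactly on [s, hi], the scan writes [j, hi] and adds hi + 1 - j
theorem scanSeg_spec (gt : List Int) (start : List Int) (s hi : Int)
    (hlab : ∀ m, s ≤ m → m ≤ hi → PySem.List.pyGetD start m 0 = s)
    (hstop : hi + 1 < (gt.length : Int) → PySem.List.pyGetD start (hi + 1) 0 = hi + 1)
    (hshi : s ≤ hi) (hhin : hi < (gt.length : Int)) :
    ∀ (k : Nat) (j : Int) (pred : List Int) (tp : Int), ((gt.length : Int) - j).toNat ≤ k →
      s ≤ j → j ≤ hi + 1 →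
      scanSeg start s (PySem.List.pyRange j (PySem.List.len gt) 1) (pred, tp)
        = ((PySem.List.pyRange j (hi + 1) 1).foldl (fun a j => PySem.List.pySetD a j 1) pred,
           tp + (hi + 1 - j)) := by
  intro k
  induction k with
  | zero =>
    intro j pred tp hk hsj hjh
    have hj : j = hi + 1 := by omega
    rw [PySem.List.pyRange_one_eq_nil (show PySem.List.len gt ≤ j from by
      simp only [PySem.List.len_eq]; omega)]
    rw [PySem.List.pyRange_one_eq_nil (show (hi + 1 : Int) ≤ j from by omega)]
    simp only [scanSeg, List.foldl_nil, Prod.mk.injEq, true_and]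
    omega
  | succ k ih =>
    intro j pred tp hk hsj hjh
    by_cases hj : j ≤ hi
    · rw [show PySem.List.pyRange j (PySem.List.len gt) 1
            = j :: PySem.List.pyRange (j + 1) (PySem.List.len gt) 1 from by
          simp only [PySem.List.len_eq]; exact PySem.List.pyRange_one_cons (by omega)]
      simp only [scanSeg, hlab j hsj hj, ne_eq, not_true_eq_false, if_false]
      rw [ih (j + 1) (PySem.List.pySetD pred j 1) (tp + 1) (by omega) (by omega) (by omega)]
      rw [show PySem.List.pyRange j (hi + 1) 1
            = j :: PySem.List.pyRange (j + 1) (hi + 1) 1 from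
          PySem.List.pyRange_one_cons (by omega)]
      simp only [List.foldl_cons, Prod.mk.injEq, true_and]
      omega
    · have hj1 : j = hi + 1 := by omega
      rw [PySem.List.pyRange_one_eq_nil (show (hi + 1 : Int) ≤ j from by omega)]
      simp only [List.foldl_nil]
      by_cases hlt : hi + 1 < (gt.length : Int)
      · rw [show PySem.List.pyRange j (PySem.List.len gt) 1
              = j :: PySem.List.pyRange (j + 1) (PySem.List.len gt) 1 from by
            simp only [PySem.List.len_eq]; exact PySem.List.pyRange_one_cons (by omega)]
        simp only [scanSeg, hj1, hstop hlt]
        rw [if_pos (by omega)]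
        simp only [Prod.mk.injEq, true_and]
        omega
      · rw [PySem.List.pyRange_one_eq_nil (show PySem.List.len gt ≤ j from by
          simp only [PySem.List.len_eq]; omega)]
        simp only [scanSeg, Prod.mk.injEq, true_and]
        omega

-- A's right-side loop, characterised by the bound scan bHi
theorem segLoop_right (gt : List Int) : ∀ (k : Nat) (j : Int) (np : List Int) (tp : Int),
    ((gt.length : Int) - j).toNat ≤ k →
    segLoop gt (PySem.List.pyRange j (PySem.List.len gt) 1) (np, tp)
      = ((PySem.List.pyRange j (bHi gt (j - 1) + 1) 1).foldl
            (fun a j => PySem.List.pySetD a j 1) np,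
         tp + (bHi gt (j - 1) + 1 - j)) := by
  intro k
  induction k with
  | zero =>
    intro j np tp hk
    have hj : (gt.length : Int) ≤ j := by omega
    have hb : bHi gt (j - 1) = j - 1 := by
      rw [bHi, dif_neg]; simp only [PySem.List.len_eq, not_and_or]; left; omega
    rw [hb]
    rw [PySem.List.pyRange_one_eq_nil (show PySem.List.len gt ≤ j from by
      simp only [PySem.List.len_eq]; omega)]
    rw [PySem.List.pyRange_one_eq_nil (show (j - 1 + 1 : Int) ≤ j from by omega)]
    simp only [segLoop, List.foldl_nil, Prod.mk.injEq, true_and]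
    omega
  | succ k ih =>
    intro j np tp hk
    by_cases hj : j < (gt.length : Int)
    · rw [show PySem.List.pyRange j (PySem.List.len gt) 1
            = j :: PySem.List.pyRange (j + 1) (PySem.List.len gt) 1 from by
          simp only [PySem.List.len_eq]; exact PySem.List.pyRange_one_cons (by omega)]
      by_cases hz : PySem.List.pyGetD gt j 0 = 0
      · have hb : bHi gt (j - 1) = j - 1 := by
          rw [bHi, dif_neg]
          simp only [PySem.List.len_eq, not_and_or, not_not]
          right; rw [show j - 1 + 1 = j from by omega]; exact hz
        rw [hb]
        rw [show PySem.List.pyRange j (j - 1 + 1) 1 = [] from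
          PySem.List.pyRange_one_eq_nil (by omega)]
        simp [segLoop, hz]
      · have hb : bHi gt (j - 1) = bHi gt j := by
          rw [bHi, dif_pos]
          · rw [show j - 1 + 1 = j from by omega]
          · simp only [PySem.List.len_eq]
            rw [show j - 1 + 1 = j from by omega]; exact ⟨hj, hz⟩
        have hge : j ≤ bHi gt j := bHi_ge gt j
        rw [hb]
        simp only [segLoop, hz, if_false]
        rw [ih (j + 1) (PySem.List.pySetD np j 1) (tp + 1) (by omega)]
        rw [show j + 1 - 1 = j from by omega]
        rw [show PySem.List.pyRange j (bHi gt j + 1) 1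
              = j :: PySem.List.pyRange (j + 1) (bHi gt j + 1) 1 from
            PySem.List.pyRange_one_cons (by omega)]
        simp only [List.foldl_cons, Prod.mk.injEq, true_and]
        omega
    · have hb : bHi gt (j - 1) = j - 1 := by
        rw [bHi, dif_neg]; simp only [PySem.List.len_eq]; omega
      rw [hb]
      rw [PySem.List.pyRange_one_eq_nil (show PySem.List.len gt ≤ j from by
        simp only [PySem.List.len_eq]; omega)]
      rw [show PySem.List.pyRange j (j - 1 + 1) 1 = [] from
        PySem.List.pyRange_one_eq_nil (by omega)]
      simp [segLoop]

-- A's left-side loop, characterised by the bound scan bLo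
theorem segLoop_left (gt : List Int) : ∀ (k : Nat) (j : Int) (np : List Int) (tp : Int),
    (j + 1).toNat ≤ k →
    segLoop gt (PySem.List.pyRange j (-1) (-1)) (np, tp)
      = ((PySem.List.pyRange j (bLo gt (j + 1) - 1) (-1)).foldl
            (fun a j => PySem.List.pySetD a j 1) np,
         tp + (j + 1 - bLo gt (j + 1))) := by
  intro k
  induction k with
  | zero =>
    intro j np tp hk
    have hj : j < 0 := by omega
    have hb : bLo gt (j + 1) = j + 1 := by rw [bLo, dif_neg]; simp only [not_and_or]; left; omega
    rw [hb]
    rw [PySem.List.pyRange_neg_one_eq_nil (show (j : Int) ≤ -1 from by omega)]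
    rw [PySem.List.pyRange_neg_one_eq_nil (show (j : Int) ≤ j + 1 - 1 from by omega)]
    simp [segLoop]
  | succ k ih =>
    intro j np tp hk
    by_cases hj : 0 ≤ j
    · rw [PySem.List.pyRange_neg_one_cons (by omega)]
      by_cases hz : PySem.List.pyGetD gt j 0 = 0
      · have hb : bLo gt (j + 1) = j + 1 := by
          rw [bLo, dif_neg]
          simp only [not_and_or, not_not]
          right; rw [show j + 1 - 1 = j from by omega]; exact hz
        rw [hb]
        rw [show PySem.List.pyRange j (j + 1 - 1) (-1) = [] from
          PySem.List.pyRange_neg_one_eq_nil (by omega)]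
        simp [segLoop, hz]
      · have hb : bLo gt (j + 1) = bLo gt j := by
          rw [bLo, dif_pos]
          · rw [show j + 1 - 1 = j from by omega]
          · rw [show j + 1 - 1 = j from by omega]; exact ⟨by omega, hz⟩
        have hle : bLo gt j ≤ j := bLo_le gt j
        rw [hb]
        simp only [segLoop, hz, if_false]
        rw [ih (j - 1) (PySem.List.pySetD np j 1) (tp + 1) (by omega)]
        rw [show j - 1 + 1 = j from by omega]
        rw [PySem.List.pyRange_neg_one_cons (show bLo gt j - 1 < j from by omega)]
        simp only [List.foldl_cons, Prod.mk.injEq, true_and]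
        omega
    · have hb : bLo gt (j + 1) = j + 1 := by rw [bLo, dif_neg]; simp only [not_and_or]; left; omega
      rw [hb, PySem.List.pyRange_neg_one_eq_nil (by omega),
          PySem.List.pyRange_neg_one_eq_nil (by omega)]
      simp [segLoop]

-- a valid negative Python index denotes the same cell as its wrapped non-negative form
theorem pyIdx?_wrap (n : Nat) (j : Int) (h1 : -(n : Int) ≤ j) (h2 : j < 0) :
    PySem.List.pyIdx? n j = PySem.List.pyIdx? n (j + n) := by
  unfold PySem.List.pyIdx?
  rw [if_neg (by omega), if_pos h1, if_pos (by omega : (0:Int) ≤ j + n), if_pos (by omega)]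
  congr 1
  omega

theorem pyGetD_wrap (xs : List Int) (j d : Int)
    (h1 : -(xs.length : Int) ≤ j) (h2 : j < 0) :
    PySem.List.pyGetD xs j d = PySem.List.pyGetD xs (j + xs.length) d := by
  unfold PySem.List.pyGetD PySem.List.pyGet?
  rw [pyIdx?_wrap xs.length j h1 h2]

theorem pySetD_wrap (xs : List Int) (j v : Int)
    (h1 : -(xs.length : Int) ≤ j) (h2 : j < 0) :
    PySem.List.pySetD xs j v = PySem.List.pySetD xs (j + xs.length) v := by
  unfold PySem.List.pySetD PySem.List.pySet?
  rw [pyIdx?_wrap xs.length j h1 h2]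

-- while the raw-bounded right scan stops at a zero before crossing index 0,
-- it computes the wrapped bound shifted by the length
theorem bHi_shift (gt : List Int) : ∀ (k : Nat) (j : Int), (-j).toNat ≤ k →
    -(gt.length : Int) ≤ j → j < 0 →
    (∃ m, j < m ∧ m ≤ 0 ∧ PySem.List.pyGetD gt m 0 = 0) →
    bHi gt j = bHi gt (j + gt.length) - gt.length := by
  intro k
  induction k with
  | zero => intro j hk _ hj _; omega
  | succ k ih =>
    intro j hk hjn hj hw
    obtain ⟨m, hm1, hm2, hm0⟩ := hw
    have hn : 0 < (gt.length : Int) := by omega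
    by_cases hz : PySem.List.pyGetD gt (j + 1) 0 = 0
    · have hL : bHi gt j = j := by
        rw [bHi, dif_neg]
        simp only [PySem.List.len_eq, not_and_or, not_not]
        right; exact hz
      have hR : bHi gt (j + gt.length) = j + gt.length := by
        rw [bHi, dif_neg]
        simp only [PySem.List.len_eq, not_and_or, not_not]
        by_cases hj1 : j + 1 < 0
        · right
          rw [show j + (gt.length : Int) + 1 = (j + 1) + gt.length from by omega]
          rw [← pyGetD_wrap gt (j + 1) 0 (by omega) hj1]
          exact hz
        · left; omega
      rw [hL, hR]; omega
    · have hj1 : j + 1 < 0 := by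
        by_contra hc
        have hmne : m = j + 1 := by omega
        exact hz (hmne ▸ hm0)
      have hL : bHi gt j = bHi gt (j + 1) := by
        rw [bHi, dif_pos]
        simp only [PySem.List.len_eq]
        exact ⟨by omega, hz⟩
      have hR : bHi gt (j + gt.length) = bHi gt ((j + 1) + gt.length) := by
        rw [bHi, dif_pos]
        · rw [show j + (gt.length : Int) + 1 = (j + 1) + gt.length from by omega]
        · simp only [PySem.List.len_eq]
          constructor
          · omega
          · rw [show j + (gt.length : Int) + 1 = (j + 1) + gt.length from by omega]
            rw [← pyGetD_wrap gt (j + 1) 0 (by omega) hj1]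
            exact hz
      rw [hL, hR]
      have hmne : m ≠ j + 1 := fun h => hz (by rw [← h]; exact hm0)
      exact ih (j + 1) (by omega) (by omega) hj1 ⟨m, by omega, hm2, hm0⟩

-- when everything from right of the start to the end and gt[0] is nonzero,
-- the raw-bounded scan crosses index 0
theorem bHi_wrap_nonneg (gt : List Int) : ∀ (k : Nat) (j : Int), (-j).toNat ≤ k →
    -(gt.length : Int) ≤ j → j < 0 →
    (∀ m, j < m → m < 0 → PySem.List.pyGetD gt m 0 ≠ 0) →
    PySem.List.pyGetD gt 0 0 ≠ 0 →
    0 ≤ bHi gt j := by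
  intro k
  induction k with
  | zero => intro j hk _ hj _ _; omega
  | succ k ih =>
    intro j hk hjn hj hall h0
    by_cases hj1 : j + 1 < 0
    · rw [bHi, dif_pos (by
        simp only [PySem.List.len_eq]
        exact ⟨by omega, hall (j + 1) (by omega) hj1⟩)]
      exact ih (j + 1) (by omega) (by omega) hj1 (fun m hm1 hm2 => hall m (by omega) hm2) h0
    · have hj0 : j + 1 = 0 := by omega
      rw [bHi, dif_pos (by
        simp only [PySem.List.len_eq, hj0]
        exact ⟨by omega, h0⟩)]
      rw [hj0]
      have := bHi_ge gt 0
      omega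

-- shifting an integer range
theorem pyRange_map_sub (n : Int) : ∀ (k : Nat) (a b : Int), (b - a).toNat ≤ k →
    PySem.List.pyRange a b 1 = (PySem.List.pyRange (a + n) (b + n) 1).map (fun x => x - n) := by
  intro k
  induction k with
  | zero =>
    intro a b hk
    rw [PySem.List.pyRange_one_eq_nil (by omega : b ≤ a),
        PySem.List.pyRange_one_eq_nil (by omega : b + n ≤ a + n)]
    rfl
  | succ k ih =>
    intro a b hk
    by_cases hab : a < b
    · rw [PySem.List.pyRange_one_cons hab,
          PySem.List.pyRange_one_cons (by omega : a + n < b + n)]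
      simp only [List.map_cons, add_sub_cancel_right]
      rw [ih (a + 1) b (by omega), show a + 1 + n = a + n + 1 from by omega]
    · rw [PySem.List.pyRange_one_eq_nil (by omega : b ≤ a),
          PySem.List.pyRange_one_eq_nil (by omega : b + n ≤ a + n)]
      rfl

-- a fold of wrapped negative writes equals the fold of the wrapped non-negative writes
theorem foldl_pySetD_sub (N : Int) : ∀ (l : List Int) (xs : List Int),
    (xs.length : Int) = N → (∀ x ∈ l, 0 ≤ x ∧ x < N) →
    l.foldl (fun a x => PySem.List.pySetD a (x - N) 1) xs
      = l.foldl (fun a x => PySem.List.pySetD a x 1) xs := by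
  intro l
  induction l with
  | nil => intro xs _ _; rfl
  | cons x l ih =>
    intro xs hlen hmem
    obtain ⟨hx0, hxN⟩ := hmem x List.mem_cons_self
    simp only [List.foldl_cons]
    rw [show PySem.List.pySetD xs (x - N) 1 = PySem.List.pySetD xs x 1 from by
      rw [pySetD_wrap xs (x - N) 1 (by omega) (by omega)]
      congr 1
      omega]
    exact ih _ (by rw [PySem.List.length_pySetD]; exact hlen)
      (fun y hy => hmem y (List.mem_cons_of_mem _ hy))

-- the wraparound read gt[flip_idx - 1] != 0 states exactly pvLeftExt
theorem leftExt_iff (gt : List Int) (f : Int) (h1 : -(gt.length : Int) ≤ f) (h2 : f < 0) :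
    (PySem.List.pyGetD gt (f - 1) 0 ≠ 0) ↔ pvLeftExt gt f := by
  unfold pvLeftExt
  by_cases hf : -(gt.length : Int) ≤ f - 1
  · rw [pyGetD_wrap gt (f - 1) 0 hf (by omega)]
    constructor
    · intro h; exact ⟨by omega, by rw [show f + (gt.length : Int) - 1 = f - 1 + gt.length from by omega]; exact h⟩
    · intro h; rw [show f - 1 + (gt.length : Int) = f + gt.length - 1 from by omega]; exact h.2
  · have hnone : PySem.List.pyGet? gt (f - 1) = none :=
      (PySem.List.pyGet?_eq_none_iff gt (f - 1)).mpr (fun hc => hf hc.1)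
    simp only [PySem.List.pyGetD, hnone, Option.getD_none]
    constructor
    · intro h; exact absurd rfl h
    · intro h; exact absurd h.1 (by omega)

-- the wraparound reads "gt[z] != 0 for z in range(flip_idx+1, 1)" state exactly pvWrapFull
theorem wrapFull_iff (gt : List Int) (f : Int) (h1 : -(gt.length : Int) ≤ f) (h2 : f < 0) :
    (∀ z ∈ PySem.List.pyRange (f + 1) 1 1, PySem.List.pyGetD gt z 0 ≠ 0) ↔ pvWrapFull gt f := by
  unfold pvWrapFull
  constructor
  · intro h
    constructor
    · intro z hz
      rw [PySem.List.mem_pyRange_one] at hz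
      rw [show z = (z - gt.length) + gt.length from by omega,
          ← pyGetD_wrap gt (z - gt.length) 0 (by omega) (by omega)]
      exact h (z - gt.length) (by rw [PySem.List.mem_pyRange_one]; omega)
    · exact h 0 (by rw [PySem.List.mem_pyRange_one]; omega)
  · intro h z hz
    rw [PySem.List.mem_pyRange_one] at hz
    by_cases hz0 : z < 0
    · rw [pyGetD_wrap gt z 0 (by omega) hz0]
      exact h.1 (z + gt.length) (by rw [PySem.List.mem_pyRange_one]; omega)
    · rw [show z = 0 from by omega]
      exact h.2

-- A's true-positive branch, fully evaluated through the bound scans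
theorem TP_A_eval (gt : List Int) (pred : List Int) (f : Int)
    (hp : PySem.List.pyGetD pred f 0 ≠ 1) (hg : PySem.List.pyGetD gt f 0 = 1)
    (h1 : -(pred.length : Int) ≤ f) (h2 : f < (pred.length : Int)) :
    segment_adjust_flip gt pred f
      = (gt,
         (PySem.List.pyRange (f - 1) (bLo gt f - 1) (-1)).foldl
            (fun a j => PySem.List.pySetD a j 1)
            ((PySem.List.pyRange (f + 1) (bHi gt f + 1) 1).foldl
              (fun a j => PySem.List.pySetD a j 1) (PySem.List.pySetD pred f 1)),
         bHi gt f - bLo gt f + 1, 0) := by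
  have hself : PySem.List.pyGetD (PySem.List.pySetD pred f 1) f 0 = 1 :=
    pyGetD_pySetD_self pred f 1 0 h1 h2
  unfold segment_adjust_flip
  simp only [hp, hg, hself, if_pos, and_self, ite_false, not_true, ne_eq]
  rw [segLoop_right gt ((gt.length : Int) - (f + 1)).toNat (f + 1) _ _ (by omega)]
  rw [show f + 1 - 1 = f from by omega]
  rw [segLoop_left gt (f - 1 + 1).toNat (f - 1) _ _ (by omega)]
  rw [show f - 1 + 1 = f from by omega]
  dsimp only
  have := bLo_le gt f
  have := bHi_ge gt f
  refine Prod.ext rfl (Prod.ext rfl (Prod.ext (by dsimp only; omega) rfl))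

-- B's true-positive branch, fully evaluated through the bound scans
theorem TP_B_eval (gt : List Int) (pred : List Int) (f i0 : Int)
    (hp : PySem.List.pyGetD pred f 0 ≠ 1) (hg : PySem.List.pyGetD gt f 0 = 1)
    (hi0 : i0 = if 0 ≤ f then f else f + (gt.length : Int))
    (hr0 : 0 ≤ i0) (hr1 : i0 < (gt.length : Int))
    (hgi0 : PySem.List.pyGetD gt i0 0 = 1) :
    segment_adjust_flip_alt gt pred f
      = (gt,
         (PySem.List.pyRange (bLo gt i0) (bHi gt i0 + 1) 1).foldl
            (fun a j => PySem.List.pySetD a j 1) pred,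
         bHi gt i0 - bLo gt i0 + 1, 0) := by
  have hg0 : PySem.List.pyGetD gt i0 0 ≠ 0 := by rw [hgi0]; norm_num
  obtain ⟨hbl, hbg⟩ := buildStart_spec gt
  have hs : PySem.List.pyGetD (buildStart gt) i0 0 = bLo gt i0 := by
    rw [hbg i0 hr0 hr1, runLabel, if_neg hg0]
  have hloi : bLo gt i0 ≤ i0 := bLo_le gt i0
  have hihi : i0 ≤ bHi gt i0 := bHi_ge gt i0
  have hlo0 : 0 ≤ bLo gt i0 := bLo_nonneg gt i0 hr0
  have hhin : bHi gt i0 < (gt.length : Int) := bHi_lt gt i0 hr1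
  unfold segment_adjust_flip_alt
  simp only [hp, hg, ite_false, not_true, ne_eq, not_false_eq_true, if_neg]
  rw [show (if 0 ≤ f then f else f + PySem.List.len gt) = i0 from by
    simp only [PySem.List.len_eq]; rw [hi0]]
  rw [hs]
  rw [scanSeg_spec gt (buildStart gt) (bLo gt i0) (bHi gt i0)
        (by
          intro m hm1 hm2
          rw [hbg m (by omega) (by omega), runLabel]
          by_cases hmi : m ≤ i0
          · obtain ⟨hne, heq⟩ := bLo_run gt i0 hg0 m hm1 hmi
            rw [if_neg hne]; exact heq
          · obtain ⟨hne, heq⟩ := bHi_run gt i0 hr0 hg0 m (by omega) hm2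
            rw [if_neg hne]; exact heq)
        (by
          intro hlt
          have hz : PySem.List.pyGetD gt (bHi gt i0 + 1) 0 = 0 := by
            have := bHi_fix gt i0
            by_contra hne
            exact this ⟨hlt, hne⟩
          rw [hbg (bHi gt i0 + 1) (by omega) hlt, runLabel, if_pos hz])
        (by omega) hhin
        ((gt.length : Int) - bLo gt i0).toNat (bLo gt i0) pred 0
        (by omega) (by omega) (by omega)]
  dsimp only
  refine Prod.ext rfl (Prod.ext rfl (Prod.ext (by dsimp only; omega) rfl))

-- the two write orders produce the same list: the written index lists are permutations
-- of each other and all writes (all storing 1) commute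
theorem writes_perm (old_pred : List Int) (i lo hi : Int) (hlo : lo ≤ i) (hhi : i ≤ hi) :
    (PySem.List.pyRange (i - 1) (lo - 1) (-1)).foldl (fun a j => PySem.List.pySetD a j 1)
        ((PySem.List.pyRange (i + 1) (hi + 1) 1).foldl (fun a j => PySem.List.pySetD a j 1)
          (PySem.List.pySetD old_pred i 1))
      = (PySem.List.pyRange lo (hi + 1) 1).foldl (fun a j => PySem.List.pySetD a j 1) old_pred := by
  have hL : PySem.List.pyRange (i - 1) (lo - 1) (-1)
      = (PySem.List.pyRange lo i 1).reverse := by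
    rw [PySem.List.pyRange_neg_one_eq_reverse]
    congr 1
    rw [show lo - 1 + 1 = lo from by omega, show i - 1 + 1 = i from by omega]
  have hsplit : PySem.List.pyRange lo (hi + 1) 1
      = PySem.List.pyRange lo i 1 ++ (i :: PySem.List.pyRange (i + 1) (hi + 1) 1) := by
    rw [PySem.List.pyRange_one_append lo i (hi + 1) (by omega) (by omega)]
    rw [show PySem.List.pyRange i (hi + 1) 1
          = i :: PySem.List.pyRange (i + 1) (hi + 1) 1 from
        PySem.List.pyRange_one_cons (by omega)]
  have hperm : ((i :: PySem.List.pyRange (i + 1) (hi + 1) 1)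
        ++ (PySem.List.pyRange lo i 1).reverse).Perm
      (PySem.List.pyRange lo (hi + 1) 1) := by
    rw [hsplit]
    exact (List.perm_append_comm).trans
      (List.Perm.append_right _ (List.reverse_perm _))
  have rcomm : RightCommutative (fun (a : List Int) (j : Int) => PySem.List.pySetD a j 1) :=
    ⟨fun a x y => pySetD_comm a x y⟩
  calc (PySem.List.pyRange (i - 1) (lo - 1) (-1)).foldl (fun a j => PySem.List.pySetD a j 1)
          ((PySem.List.pyRange (i + 1) (hi + 1) 1).foldl (fun a j => PySem.List.pySetD a j 1)
            (PySem.List.pySetD old_pred i 1))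
      = ((i :: PySem.List.pyRange (i + 1) (hi + 1) 1)
          ++ (PySem.List.pyRange lo i 1).reverse).foldl
            (fun a j => PySem.List.pySetD a j 1) old_pred := by
        rw [hL, List.foldl_append]; rfl
    _ = (PySem.List.pyRange lo (hi + 1) 1).foldl
            (fun a j => PySem.List.pySetD a j 1) old_pred :=
        hperm.foldl_eq old_pred

-- a failed pvWrapFull yields a stopping zero for the raw scan
theorem wrap_witness (gt : List Int) (f : Int) (hf : f < 0)
    (hrn : -(gt.length : Int) ≤ f) (hnw : ¬pvWrapFull gt f) :
    ∃ m, f < m ∧ m ≤ 0 ∧ PySem.List.pyGetD gt m 0 = 0 := by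
  unfold pvWrapFull at hnw
  rw [not_and_or] at hnw
  rcases hnw with h | h
  · push_neg at h
    obtain ⟨z, hz, hz0⟩ := h
    rw [PySem.List.mem_pyRange_one] at hz
    refine ⟨z - gt.length, by omega, by omega, ?_⟩
    rw [pyGetD_wrap gt (z - gt.length) 0 (by omega) (by omega)]
    rw [show z - (gt.length : Int) + gt.length = z from by omega]
    simpa using hz0
  · exact ⟨0, by omega, by omega, by simpa using h⟩

-- ===== VERDICT (by name: the statements are the Claim_ definitions above) =====
theorem segment_adjust_flip_spec : Claim_unchanged_segment_adjust_flip := by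
  unfold Claim_unchanged_segment_adjust_flip Spec_segment_adjust_flip
  intro gt old_pred f _hdom hpre hnd
  obtain ⟨⟨h1, h2⟩, hpre2, hnb⟩ := hpre
  by_cases hp : PySem.List.pyGetD old_pred f 0 = 1
  · simp [segment_adjust_flip, segment_adjust_flip_alt, hp]
  · by_cases hg : PySem.List.pyGetD gt f 0 = 1
    · have hgin : PySem.Raise.InRange gt.length f := by
        by_contra hcon
        have hnone : PySem.List.pyGet? gt f = none := (PySem.List.pyGet?_eq_none_iff gt f).mpr hcon
        simp [PySem.List.pyGetD, hnone] at hg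
      have hlen : gt.length = old_pred.length := by
        rcases hpre2 with h | h | h
        · exact h
        · exact absurd h hp
        · exact absurd hg h.2
      rw [TP_A_eval gt old_pred f hp hg h1 h2]
      by_cases hf0 : 0 ≤ f
      · rw [TP_B_eval gt old_pred f f hp hg (by rw [if_pos hf0]) hf0 (by omega) hg]
        exact Prod.ext rfl (Prod.ext
          (writes_perm old_pred f (bLo gt f) (bHi gt f) (bLo_le gt f) (bHi_ge gt f)) rfl)
      · -- negative flip_idx outside D_ and outside the excluded corner: no left
        -- extension, no wrap: both programs write [f+n's segment] = the right run only
        have hneg : pvNegSeg gt old_pred f := ⟨by omega, hgin, ⟨h1, h2⟩, hp, hg⟩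
        have hrn : -(gt.length : Int) ≤ f := hgin.1
        have hnl : ¬pvLeftExt gt f ∧ ¬pvWrapFull gt f := by
          unfold D_segment_adjust_flip at hnd
          rw [leftExt_iff gt f hrn (by omega), wrapFull_iff gt f hrn (by omega)] at hnd
          have hflt : f < 0 := by omega
          tauto
        have hgi0 : PySem.List.pyGetD gt (f + gt.length) 0 = 1 := by
          rw [← pyGetD_wrap gt f 0 hrn (by omega)]; exact hg
        rw [TP_B_eval gt old_pred f (f + gt.length) hp hg (by rw [if_neg hf0])
              (by omega) (by omega) hgi0]
        have hshift : bHi gt f = bHi gt (f + gt.length) - gt.length :=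
          bHi_shift gt (-f).toNat f (le_refl _) hrn (by omega)
            (wrap_witness gt f (by omega) hrn hnl.2)
        have hblof : bLo gt f = f := by
          conv_lhs => rw [bLo]
          exact dif_neg (fun hc => absurd hc.1 (by omega))
        have hbloi : bLo gt (f + (gt.length : Int)) = f + gt.length := by
          conv_lhs => rw [bLo]
          exact dif_neg hnl.1
        have hgei : f + (gt.length : Int) ≤ bHi gt (f + gt.length) := bHi_ge gt _
        have hhin : bHi gt (f + (gt.length : Int)) < (gt.length : Int) :=
          bHi_lt gt _ (by omega)
        refine Prod.ext rfl (Prod.ext ?_ (Prod.ext (by dsimp only; omega) rfl))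
        dsimp only
        rw [hblof, hshift, hbloi]
        rw [PySem.List.pyRange_neg_one_eq_nil (by omega : f - 1 ≤ f - 1)]
        simp only [List.foldl_nil]
        rw [pySetD_wrap old_pred f 1 (by omega) (by omega),
            show f + (old_pred.length : Int) = f + (gt.length : Int) from by omega]
        rw [pyRange_map_sub (gt.length : Int)
              (bHi gt (f + (gt.length : Int)) - (gt.length : Int) - f).toNat
              (f + 1) (bHi gt (f + (gt.length : Int)) - (gt.length : Int) + 1) (by omega)]
        rw [show f + 1 + (gt.length : Int) = f + (gt.length : Int) + 1 from by omega,
            show bHi gt (f + (gt.length : Int)) - (gt.length : Int) + 1 + (gt.length : Int)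
              = bHi gt (f + (gt.length : Int)) + 1 from by omega]
        rw [List.foldl_map]
        rw [foldl_pySetD_sub (gt.length : Int) _ _
              (by rw [PySem.List.length_pySetD]; omega)
              (fun x hx => by rw [PySem.List.mem_pyRange_one] at hx; omega)]
        rw [show PySem.List.pyRange (f + (gt.length : Int)) (bHi gt (f + (gt.length : Int)) + 1) 1
              = (f + (gt.length : Int))
                  :: PySem.List.pyRange (f + (gt.length : Int) + 1)
                      (bHi gt (f + (gt.length : Int)) + 1) 1 from
            PySem.List.pyRange_one_cons (by omega)]
        rw [List.foldl_cons]
    · simp [segment_adjust_flip, segment_adjust_flip_alt, hp, hg]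

theorem segment_adjust_flip_changed : Claim_changed_segment_adjust_flip := by
  unfold Claim_changed_segment_adjust_flip; decide

theorem segment_adjust_flip_tight : Claim_exact_segment_adjust_flip := by
  unfold Claim_exact_segment_adjust_flip
  intro gt old_pred f _hdom hpre hd
  obtain ⟨hf, hp, hg, hxor⟩ := hd
  obtain ⟨⟨h1, h2⟩, -, -⟩ := hpre
  have hgin : PySem.Raise.InRange gt.length f := by
    by_contra hcon
    have hnone : PySem.List.pyGet? gt f = none := (PySem.List.pyGet?_eq_none_iff gt f).mpr hcon
    simp [PySem.List.pyGetD, hnone] at hg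
  have hrn : -(gt.length : Int) ≤ f := hgin.1
  rw [leftExt_iff gt f hrn hf, wrapFull_iff gt f hrn hf] at hxor
  have hcase : (pvLeftExt gt f ∧ ¬pvWrapFull gt f) ∨ (¬pvLeftExt gt f ∧ pvWrapFull gt f) := by
    tauto
  have hgi0 : PySem.List.pyGetD gt (f + gt.length) 0 = 1 := by
    rw [← pyGetD_wrap gt f 0 hrn hf]; exact hg
  rw [TP_A_eval gt old_pred f hp hg h1 h2,
      TP_B_eval gt old_pred f (f + gt.length) hp hg (by rw [if_neg (by omega)])
        (by omega) (by omega) hgi0]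
  intro heq
  have htp := congrArg (fun t => t.2.2.1) heq
  dsimp only at htp
  have hblof : bLo gt f = f := by
    conv_lhs => rw [bLo]
    exact dif_neg (fun hc => absurd hc.1 (by omega))
  have hhin : bHi gt (f + (gt.length : Int)) < (gt.length : Int) := bHi_lt gt _ (by omega)
  rcases hcase with ⟨hl, hnw⟩ | ⟨hnl, hw⟩
  · -- left extension, no wrap: A misses the left cells, its count is smaller
    have hshift : bHi gt f = bHi gt (f + gt.length) - gt.length :=
      bHi_shift gt (-f).toNat f (le_refl _) hrn hf (wrap_witness gt f hf hrn hnw)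
    have hlo : bLo gt (f + (gt.length : Int)) < f + gt.length := by
      have hstep : bLo gt (f + (gt.length : Int)) = bLo gt (f + (gt.length : Int) - 1) := by
        conv_lhs => rw [bLo]
        exact dif_pos ⟨hl.1, hl.2⟩
      have := bLo_le gt (f + (gt.length : Int) - 1)
      omega
    rw [hblof, hshift] at htp
    omega
  · -- full wrap: A re-counts from index 0, its count is larger
    have hge : 0 ≤ bHi gt f := by
      refine bHi_wrap_nonneg gt (-f).toNat f (le_refl _) hrn hf ?_ hw.2
      intro m hm1 hm2
      have hz := hw.1 (m + gt.length) (by rw [PySem.List.mem_pyRange_one]; omega)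
      rw [pyGetD_wrap gt m 0 (by omega) hm2]
      exact hz
    have hbloi : bLo gt (f + (gt.length : Int)) = f + gt.length := by
      conv_lhs => rw [bLo]
      exact dif_neg hnl
    rw [hblof, hbloi] at htp
    omega
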